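-- pv_equiv track=rewrite | github.com/sakshishinde63/Applied-Cryptography- | ac assignment2.py | checkInverse
-- ===== SOURCE A (Python) =====
-- def checkInverse(n):
--     inverses = {}
--     for a in range(n):
--         for b in range(n):
--             if (a + b) % n == 0:
--                 inverses[a] = b
--                 break
--     return inverses
-- ===== SOURCE B (Python) =====
-- def checkInverse(n):
--     # Direct closed form: the additive inverse of a mod n is (n - a) % n.
--     return {a: (n - a) % n for a in range(n)}
-- ===== Notes on version B (the rewrite author's own statement) =====
-- stated objective: faster
-- what changed: Replaces the quadratic inner scan for the first b with (a+b)%n==0 by the closed-form inverse (n-a)%n computed directly for each a.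
import Mathlib
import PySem

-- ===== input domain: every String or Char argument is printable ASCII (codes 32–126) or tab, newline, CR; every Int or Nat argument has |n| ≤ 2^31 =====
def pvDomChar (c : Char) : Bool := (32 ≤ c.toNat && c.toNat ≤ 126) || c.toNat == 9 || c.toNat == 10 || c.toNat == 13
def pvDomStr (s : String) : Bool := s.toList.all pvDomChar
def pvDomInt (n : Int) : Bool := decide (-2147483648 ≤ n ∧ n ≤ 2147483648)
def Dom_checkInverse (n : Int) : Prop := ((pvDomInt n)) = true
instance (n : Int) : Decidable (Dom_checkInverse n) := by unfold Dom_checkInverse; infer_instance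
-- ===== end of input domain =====

-- B replaces A's quadratic scan for the first b with (a+b)%n==0 by the direct formula (n-a)%n; faster (asymptotic).

-- ===== PORT A =====
-- inner 'for b in range(n): if (a+b) % n == 0: inverses[a] = b; break'
def checkInverseInner (n a : Int) : List Int → PySem.Dict Int Int → PySem.Dict Int Int
  | [], d => d
  | b :: bs, d =>
      if PySem.Int.mod (a + b) n = 0 then d.insert a b
      else checkInverseInner n a bs d

def checkInverse (n : Int) : List (Int × Int) :=
  ((PySem.List.pyRange 0 n 1).foldl
      (fun d a => checkInverseInner n a (PySem.List.pyRange 0 n 1) d)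
      PySem.Dict.empty).items

-- ===== PORT B =====
def checkInverse_alt (n : Int) : List (Int × Int) :=
  ((PySem.List.pyRange 0 n 1).foldl
      (fun d a => d.insert a (PySem.Int.mod (n - a) n))
      PySem.Dict.empty).items

-- ===== PRECONDITION & SPEC =====
def Spec_checkInverse (n : Int) (out : List (Int × Int)) : Prop := out = checkInverse_alt n
instance (n : Int) (out : List (Int × Int)) : Decidable (Spec_checkInverse n out) := by unfold Spec_checkInverse; infer_instance

-- ===== CLAIM (what is proved, stated in full; the proofs are below) =====
def Claim_equal_checkInverse : Prop := ∀ (n : Int), Dom_checkInverse n → Spec_checkInverse n (checkInverse n)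

-- ===== LEMMAS AND PROOFS =====

-- the inner loop skips a prefix on which the condition fails
lemma checkInverseInner_skip (n a : Int) (l1 l2 : List Int) (d : PySem.Dict Int Int)
    (h : ∀ b ∈ l1, PySem.Int.mod (a + b) n ≠ 0) :
    checkInverseInner n a (l1 ++ l2) d = checkInverseInner n a l2 d := by
  induction l1 with
  | nil => rfl
  | cons b bs ih =>
      simp only [List.cons_append, checkInverseInner]
      rw [if_neg (h b (by simp))]
      exact ih (fun x hx => h x (by simp [hx]))

-- the first b in range(n) with (a+b) % n == 0 is (n-a) % n
lemma checkInverseInner_range (n a : Int) (d : PySem.Dict Int Int)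
    (ha : 0 ≤ a) (han : a < n) :
    checkInverseInner n a (PySem.List.pyRange 0 n 1) d
      = d.insert a (PySem.Int.mod (n - a) n) := by
  have hn : 0 < n := lt_of_le_of_lt ha han
  set b0 : Int := PySem.Int.mod (n - a) n with hb0
  have hb0e : b0 = (n - a) % n := by rw [hb0, PySem.Int.mod_eq_emod_of_pos hn]
  have hb0v : b0 = if a = 0 then 0 else n - a := by
    rw [hb0e]
    split_ifs with h
    · simp [h]
    · rw [Int.emod_eq_of_lt (by omega) (by omega)]
  have hb0lo : 0 ≤ b0 := by rw [hb0v]; split_ifs <;> omega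
  have hb0hi : b0 < n := by rw [hb0v]; split_ifs <;> omega
  rw [PySem.List.pyRange_one_append 0 b0 n hb0lo (le_of_lt hb0hi),
      PySem.List.pyRange_one_cons hb0hi,
      checkInverseInner_skip]
  · simp only [checkInverseInner]
    rw [if_pos]
    rw [PySem.Int.mod_eq_emod_of_pos hn, hb0v]
    split_ifs with h
    · simp [h]
    · simp
  · intro b hb
    rw [PySem.List.mem_pyRange_one] at hb
    rw [PySem.Int.mod_eq_emod_of_pos hn]
    rw [hb0v] at hb
    have hab : a + b < n ∧ 0 < a + b := by split_ifs at hb <;> omega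
    rw [Int.emod_eq_of_lt (le_of_lt hab.2) hab.1]
    omega

-- ===== VERDICT (by name: the statement is the Claim_ definition above) =====
theorem checkInverse_spec : Claim_equal_checkInverse := by
  intro n _
  unfold Spec_checkInverse checkInverse checkInverse_alt
  congr 1
  apply PySem.List.foldl_congr_mem
  intro d a ha
  rw [PySem.List.mem_pyRange_one] at ha
  exact checkInverseInner_range n a d ha.1 ha.2
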